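-- pv_equiv track=rewrite | github.com/jongwoo328/advent-of-code-2023 | python/day13/day13-1.py | check_horizontal_reflection
-- ===== SOURCE A (Python) =====
-- def check_horizontal_reflection(pattern: list[str]):
--     for i in range(1, len(pattern)):
--         for j in range(i, len(pattern)):
--             if i * 2 - j - 1 < 0:
--                 continue
--             if pattern[j] != pattern[i * 2 - j - 1]:
--                 break
--         else:
--             return i
--     else:
--         return 0
-- ===== SOURCE B (Python) =====
-- def check_horizontal_reflection(pattern: list[str]):
--     # Even-center Manacher over the rows: reuse the radius of the mirrored
--     # center inside the furthest-reaching palindrome seen so far, so each row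
--     # comparison either fails once per center or pushes the frontier right.
--     # A reflection line is a center whose palindromic radius reaches an edge.
--     n = len(pattern)
--     rad = [0] * (n + 1)
--     c = 0  # center whose palindrome currently reaches furthest down
--     for i in range(1, n):
--         r = min(rad[2 * c - i], c + rad[c] - i) if c and i < c + rad[c] else 0
--         while r < i and i + r < n and pattern[i - r - 1] == pattern[i + r]:
--             r += 1
--         if r == i or i + r == n:
--             return i
--         rad[i] = r
--         if i + r > c + rad[c]:
--             c = i
--     return 0
-- ===== Notes on version B (the rewrite author's own statement) =====
-- stated objective: faster
-- what changed: Replaces A's per-candidate rescan of all mirrored row pairs by an even-center Manacher pass that stores each center's palindromic radius and seeds the next one from the mirrored radius inside the furthest-reaching palindrome, returning the first center whose radius hits an edge.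
import Mathlib
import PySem

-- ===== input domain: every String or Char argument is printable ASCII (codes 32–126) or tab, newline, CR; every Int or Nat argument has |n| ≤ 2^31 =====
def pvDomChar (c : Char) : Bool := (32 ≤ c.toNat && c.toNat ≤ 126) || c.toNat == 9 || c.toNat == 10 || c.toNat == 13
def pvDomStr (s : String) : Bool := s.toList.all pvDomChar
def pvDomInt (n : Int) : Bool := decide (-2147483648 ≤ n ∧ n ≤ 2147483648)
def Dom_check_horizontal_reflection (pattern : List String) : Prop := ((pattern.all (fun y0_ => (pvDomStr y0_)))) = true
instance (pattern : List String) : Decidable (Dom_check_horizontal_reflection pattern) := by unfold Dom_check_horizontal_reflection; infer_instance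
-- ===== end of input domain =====

-- B replaces A's per-candidate rescan by an even-center Manacher pass over the rows
-- (reuse of mirrored radii), returning the first center whose radius reaches an edge.

-- ===== PORT A =====
-- inner 'for j in range(i, len(pattern))' with continue/break; true = loop ran to completion ('else')
def chrInner (pattern : List String) (i : Int) : List Int → Bool
  | [] => true
  | j :: rest =>
    if i * 2 - j - 1 < 0 then chrInner pattern i rest
    else if PySem.List.pyGet? pattern j ≠ PySem.List.pyGet? pattern (i * 2 - j - 1) then false
    else chrInner pattern i rest

-- outer 'for i in range(1, len(pattern))' with the early 'return i' and final 'return 0'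
def chrOuter (pattern : List String) : List Int → Int
  | [] => 0
  | i :: rest =>
    if chrInner pattern i (PySem.List.pyRange i (pattern.length : Int) 1) then i
    else chrOuter pattern rest

def check_horizontal_reflection (pattern : List String) : Int :=
  chrOuter pattern (PySem.List.pyRange 1 (pattern.length : Int) 1)

-- ===== PORT B =====
-- 'while r < i and i + r < n and pattern[i - r - 1] == pattern[i + r]: r += 1'
-- (the guards r < i and i + r < n keep both indices in range, exactly as in the Python)
def mhExpand (p : List String) (n i : Int) (r : Int) : Int :=
  if h : r < i ∧ i + r < n ∧ PySem.List.pyGet? p (i - r - 1) = PySem.List.pyGet? p (i + r)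
  then mhExpand p n i (r + 1)
  else r
termination_by (i - r).toNat
decreasing_by omega

-- 'for i in range(1, n): …'; rad[j] reads use pyGetD (always in range here), rad[i] = r is pySetD
def mhLoop (p : List String) (n : Int) : List Int → Int → List Int → Int
  | _rad, _c, [] => 0
  | rad, c, i :: rest =>
    let r0 : Int :=
      if c ≠ 0 ∧ i < c + PySem.List.pyGetD rad c 0
      then min (PySem.List.pyGetD rad (2 * c - i) 0) (c + PySem.List.pyGetD rad c 0 - i)
      else 0
    let r := mhExpand p n i r0
    if r = i ∨ i + r = n then i
    else
      let rad' := PySem.List.pySetD rad i r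
      mhLoop p n rad' (if i + r > c + PySem.List.pyGetD rad' c 0 then i else c) rest

def check_horizontal_reflection_alt (pattern : List String) : Int :=
  mhLoop pattern (pattern.length : Int)
    (List.replicate (pattern.length + 1) 0) 0
    (PySem.List.pyRange 1 (pattern.length : Int) 1)

-- ===== PRECONDITION & SPEC =====
def Spec_check_horizontal_reflection (pattern : List String) (out : Int) : Prop := out = check_horizontal_reflection_alt pattern
instance (pattern : List String) (out : Int) : Decidable (Spec_check_horizontal_reflection pattern out) := by unfold Spec_check_horizontal_reflection; infer_instance

-- ===== CLAIM (what is proved, stated in full; the proofs are below) =====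
def Claim_equal_check_horizontal_reflection : Prop := ∀ (pattern : List String), Dom_check_horizontal_reflection pattern → Spec_check_horizontal_reflection pattern (check_horizontal_reflection pattern)

-- ===== LEMMAS AND PROOFS =====

-- the specification layer: 'good p i r' = the r rows below gap i mirror the r rows above it
def goodB (p : List String) (i r : Nat) : Bool :=
  (List.range r).all (fun k => p[i + k]? == p[i - 1 - k]?)

def trueRad (p : List String) (i : Nat) : Nat :=
  Nat.findGreatest (fun r => goodB p i r = true) (min i (p.length - i))

theorem goodB_iff (p : List String) (i r : Nat) :
    goodB p i r = true ↔ ∀ k, k < r → p[i + k]? = p[i - 1 - k]? := by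
  simp [goodB]

theorem trueRad_le (p : List String) (i : Nat) : trueRad p i ≤ min i (p.length - i) :=
  Nat.findGreatest_le _

theorem goodB_trueRad (p : List String) (i : Nat) : goodB p i (trueRad p i) = true :=
  Nat.findGreatest_spec (P := fun r => goodB p i r = true) (Nat.zero_le _) rfl

theorem le_trueRad (p : List String) (i r : Nat) (h1 : r ≤ min i (p.length - i))
    (h2 : goodB p i r = true) : r ≤ trueRad p i :=
  Nat.le_findGreatest h1 h2

-- the expansion loop computes the true radius from any lower bound
theorem mhExpand_eq (p : List String) (i : Nat) (_hi1 : 1 ≤ i) (hi2 : i < p.length)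
    (s : Nat) (hs : s ≤ trueRad p i) :
    mhExpand p (p.length : Int) (i : Int) (s : Int) = (trueRad p i : Int) := by
  have hTle := trueRad_le p i
  have key := (goodB_iff p i (trueRad p i)).mp (goodB_trueRad p i)
  have cdown : ∀ k : Nat, k < i → PySem.List.pyGet? p ((i : Int) - k - 1) = p[i - 1 - k]? := by
    intro k hk
    rw [show (i : Int) - k - 1 = ((i - 1 - k : Nat) : Int) by omega,
       PySem.List.pyGet?_natCast]
  have cup : ∀ k : Nat, PySem.List.pyGet? p ((i : Int) + k) = p[i + k]? := by
    intro k
    rw [show (i : Int) + k = ((i + k : Nat) : Int) by push_cast; ring,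
       PySem.List.pyGet?_natCast]
  induction hd : trueRad p i - s generalizing s with
  | zero =>
    have hse : s = trueRad p i := by omega
    rw [mhExpand, dif_neg, hse]
    rintro ⟨h1, h2, h3⟩
    have hsi : s < i := by exact_mod_cast h1
    have hsN : i + s < p.length := by exact_mod_cast h2
    rw [cdown s hsi, cup s] at h3
    have hgood : goodB p i (s + 1) = true := by
      rw [goodB_iff]
      intro k hk
      rcases Nat.lt_or_ge k s with hks | hks
      · exact key k (by omega)
      · have : k = s := by omega
        subst this
        exact h3.symm
    have := le_trueRad p i (s + 1) (by omega) hgood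
    omega
  | succ n ih =>
    have hsT : s < trueRad p i := by omega
    have hsi : s < i := by omega
    have hsN : i + s < p.length := by omega
    rw [mhExpand, dif_pos ⟨by exact_mod_cast hsi, by exact_mod_cast hsN,
        by rw [cdown s hsi, cup s]; exact (key s hsT).symm⟩]
    rw [show (s : Int) + 1 = ((s + 1 : Nat) : Int) by push_cast; ring]
    exact ih (s + 1) (by omega) (by omega)

-- the mirror bound: inside a palindrome around c, the radius at i is at least
-- the min of the mirrored radius and the distance to the palindrome's edge
theorem mirror_bound (p : List String) (c i : Nat) (hc1 : 1 ≤ c) (hci : c < i)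
    (hi : i < c + trueRad p c) :
    min (trueRad p (2 * c - i)) (c + trueRad p c - i) ≤ trueRad p i := by
  have hRc : trueRad p c ≤ c := le_trans (trueRad_le p c) (min_le_left _ _)
  have hRN : trueRad p c ≤ p.length - c := le_trans (trueRad_le p c) (min_le_right _ _)
  have hmm : trueRad p (2 * c - i) ≤ 2 * c - i := le_trans (trueRad_le p _) (min_le_left _ _)
  have Gc := (goodB_iff p c (trueRad p c)).mp (goodB_trueRad p c)
  have Gm := (goodB_iff p (2 * c - i) (trueRad p (2 * c - i))).mp (goodB_trueRad p (2 * c - i))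
  apply le_trueRad
  · exact le_min (le_trans (min_le_left _ _) (by omega))
      (le_trans (min_le_right _ _) (by omega))
  · rw [goodB_iff]
    intro k hk
    have hk1 : k < trueRad p (2 * c - i) := lt_of_lt_of_le hk (min_le_left _ _)
    have hk2 : k < c + trueRad p c - i := lt_of_lt_of_le hk (min_le_right _ _)
    have s1 : p[i + k]? = p[2 * c - i - 1 - k]? := by
      rw [show i + k = c + (i + k - c) by omega, Gc _ (by omega),
          show c - 1 - (i + k - c) = 2 * c - i - 1 - k by omega]
    have s2 : p[2 * c - i - 1 - k]? = p[2 * c - i + k]? := (Gm k hk1).symm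
    have s3 : p[2 * c - i + k]? = p[i - 1 - k]? := by
      rcases Nat.lt_or_ge (2 * c - i + k) c with hcase | hcase
      · rw [show 2 * c - i + k = c - 1 - (c - 1 - (2 * c - i + k)) by omega,
            ← Gc _ (show c - 1 - (2 * c - i + k) < trueRad p c by omega),
            show c + (c - 1 - (2 * c - i + k)) = i - 1 - k by omega]
      · rw [show 2 * c - i + k = c + (2 * c - i + k - c) by omega, Gc _ (by omega),
            show c - 1 - (2 * c - i + k - c) = i - 1 - k by omega]
    rw [s1, s2, s3]

-- A's inner loop equals an 'all' over the visited indices (break short-circuits exactly like &&)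
theorem chrInner_eq_all (pattern : List String) (i : Int) (js : List Int) :
    chrInner pattern i js =
      js.all (fun j => if i * 2 - j - 1 < 0 then true
                       else PySem.List.pyGet? pattern j == PySem.List.pyGet? pattern (i * 2 - j - 1)) := by
  induction js with
  | nil => rfl
  | cons j rest ih =>
    simp only [chrInner, List.all_cons, ih]
    by_cases h : i * 2 - j - 1 < 0
    · simp [h]
    · by_cases hne : PySem.List.pyGet? pattern j = PySem.List.pyGet? pattern (i * 2 - j - 1)
      · simp [h, hne]
      · simp [h, hne]

-- A's check at candidate i holds iff the true radius reaches an edge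
theorem chrInner_iff_full (p : List String) (i : Nat) (_hi1 : 1 ≤ i) (hi2 : i < p.length) :
    chrInner p (i : Int) (PySem.List.pyRange (i : Int) (p.length : Int) 1) = true ↔
      trueRad p i = min i (p.length - i) := by
  have cdown : ∀ k : Nat, k < i → PySem.List.pyGet? p ((i : Int) * 2 - ((i : Int) + k) - 1) = p[i - 1 - k]? := by
    intro k hk
    rw [show (i : Int) * 2 - ((i : Int) + k) - 1 = ((i - 1 - k : Nat) : Int) by omega,
       PySem.List.pyGet?_natCast]
  have cup : ∀ k : Nat, PySem.List.pyGet? p ((i : Int) + k) = p[i + k]? := by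
    intro k
    rw [show (i : Int) + k = ((i + k : Nat) : Int) by push_cast; ring,
       PySem.List.pyGet?_natCast]
  rw [chrInner_eq_all, List.all_eq_true]
  constructor
  · intro h
    refine Nat.le_antisymm (trueRad_le p i) (le_trueRad p i _ le_rfl ?_)
    rw [goodB_iff]
    intro k hk
    have hki : k < i := lt_of_lt_of_le hk (min_le_left _ _)
    have hkN : k < p.length - i := lt_of_lt_of_le hk (min_le_right _ _)
    have hj := h ((i : Int) + k) (PySem.List.mem_pyRange_one.mpr ⟨by omega, by omega⟩)
    rw [if_neg (by omega), cdown k hki, cup k] at hj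
    exact eq_of_beq hj
  · intro hT j hj
    obtain ⟨hj1, hj2⟩ := PySem.List.mem_pyRange_one.mp hj
    obtain ⟨k, rfl⟩ : ∃ k : Nat, j = (i : Int) + k := ⟨(j - i).toNat, by omega⟩
    by_cases hg : (i : Int) * 2 - ((i : Int) + k) - 1 < 0
    · rw [if_pos hg]
    · rw [if_neg hg, cdown k (by omega), cup k]
      have := (goodB_iff p i _).mp (goodB_trueRad p i) k (by omega)
      exact beq_iff_eq.mpr this

-- the main loop invariant
theorem mhLoop_eq_chrOuter (p : List String) :
    ∀ (i0 : Nat) (rad : List Int) (c : Nat), 1 ≤ i0 →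
      rad.length = p.length + 1 →
      (∀ j : Nat, j < i0 → PySem.List.pyGetD rad (j : Int) 0 = (trueRad p j : Int)) →
      (c = 0 ∨ (1 ≤ c ∧ c < i0)) →
      mhLoop p (p.length : Int) rad (c : Int) (PySem.List.pyRange (i0 : Int) (p.length : Int) 1) =
        chrOuter p (PySem.List.pyRange (i0 : Int) (p.length : Int) 1) := by
  intro i0
  induction hfuel : p.length - i0 generalizing i0 with
  | zero =>
    intro rad c hi0 hlen hrad hc
    rw [PySem.List.pyRange_one_eq_nil (by exact_mod_cast Nat.le_of_sub_eq_zero hfuel)]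
    rfl
  | succ n ih =>
    intro rad c hi0 hlen hrad hc
    have hlt : i0 < p.length := by omega
    rw [PySem.List.pyRange_one_cons (show (i0 : Int) < (p.length : Int) by exact_mod_cast hlt)]
    simp only [mhLoop, chrOuter]
    have hcilt : c < i0 := by rcases hc with h | h <;> omega
    have hradc : PySem.List.pyGetD rad (c : Int) 0 = (trueRad p c : Int) := hrad c hcilt
    obtain ⟨s0, hs0eq, hs0le⟩ : ∃ s0 : Nat,
        (if (c : Int) ≠ 0 ∧ (i0 : Int) < (c : Int) + PySem.List.pyGetD rad (c : Int) 0
         then min (PySem.List.pyGetD rad (2 * (c : Int) - (i0 : Int)) 0)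
                  ((c : Int) + PySem.List.pyGetD rad (c : Int) 0 - (i0 : Int))
         else 0) = (s0 : Int) ∧ s0 ≤ trueRad p i0 := by
      by_cases hcnd : (c : Int) ≠ 0 ∧ (i0 : Int) < (c : Int) + PySem.List.pyGetD rad (c : Int) 0
      · have hc1 : 1 ≤ c := by
          rcases Nat.eq_zero_or_pos c with h0 | h0
          · exact absurd (by exact_mod_cast congrArg (Nat.cast : Nat → Int) h0) hcnd.1
          · exact h0
        have hio : i0 < c + trueRad p c := by
          have h2 := hcnd.2; rw [hradc] at h2; exact_mod_cast h2
        have hTc : trueRad p c ≤ c := le_trans (trueRad_le p c) (min_le_left _ _)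
        refine ⟨min (trueRad p (2 * c - i0)) (c + trueRad p c - i0), ?_,
          mirror_bound p c i0 hc1 hcilt hio⟩
        rw [if_pos hcnd, show 2 * (c : Int) - (i0 : Int) = ((2 * c - i0 : Nat) : Int) by omega,
            hrad (2 * c - i0) (by omega), hradc]
        push_cast
        omega
      · exact ⟨0, by rw [if_neg hcnd]; norm_num, Nat.zero_le _⟩
    rw [hs0eq, mhExpand_eq p i0 hi0 hlt s0 hs0le]
    have hT := trueRad_le p i0
    rw [show (i0 : Int) + 1 = ((i0 + 1 : Nat) : Int) by push_cast; ring]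
    by_cases hfull : trueRad p i0 = min i0 (p.length - i0)
    · rw [if_pos ((chrInner_iff_full p i0 hi0 hlt).mpr hfull),
          if_pos (show (trueRad p i0 : Int) = (i0 : Int) ∨ (i0 : Int) + (trueRad p i0 : Int) = (p.length : Int) by omega)]
    · have hnful : ¬((trueRad p i0 : Int) = (i0 : Int) ∨ (i0 : Int) + (trueRad p i0 : Int) = (p.length : Int)) := by omega
      have hA : chrInner p (i0 : Int) (PySem.List.pyRange (i0 : Int) (p.length : Int) 1) = false := by
        cases hh : chrInner p (i0 : Int) (PySem.List.pyRange (i0 : Int) (p.length : Int) 1) with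
        | false => rfl
        | true => exact absurd ((chrInner_iff_full p i0 hi0 hlt).mp hh) hfull
      rw [if_neg hnful, hA]
      simp only [Bool.false_eq_true, if_false]
      have hrad' : ∀ j : Nat, j < i0 + 1 →
          PySem.List.pyGetD (PySem.List.pySetD rad (i0 : Int) (trueRad p i0 : Int)) (j : Int) 0 = (trueRad p j : Int) := by
        intro j hj
        rw [PySem.List.pyGetD_pySetD_natCast rad i0 j ((trueRad p i0 : Nat) : Int) 0 (by omega)]
        by_cases hji : j = i0
        · subst hji
          rw [if_pos rfl]
        · rw [if_neg hji]
          exact hrad j (by omega)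
      have hlen' : (PySem.List.pySetD rad (i0 : Int) (trueRad p i0 : Int)).length = p.length + 1 := by
        rw [PySem.List.length_pySetD, hlen]
      by_cases hmove : (i0 : Int) + (trueRad p i0 : Int) > (c : Int) + PySem.List.pyGetD (PySem.List.pySetD rad (i0 : Int) (trueRad p i0 : Int)) (c : Int) 0
      · rw [if_pos hmove]
        exact ih (i0 + 1) (by omega) _ i0 (by omega) hlen' hrad' (Or.inr ⟨hi0, by omega⟩)
      · rw [if_neg hmove]
        exact ih (i0 + 1) (by omega) _ c (by omega) hlen' hrad' (by omega)

-- ===== VERDICT (by name: the statement is the Claim_ definition above) =====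
theorem check_horizontal_reflection_spec : Claim_equal_check_horizontal_reflection := by
  intro pattern _
  unfold Spec_check_horizontal_reflection check_horizontal_reflection check_horizontal_reflection_alt
  refine (mhLoop_eq_chrOuter pattern 1 _ 0 le_rfl (by simp) ?_ (Or.inl rfl)).symm
  intro j hj
  interval_cases j
  simp [trueRad, PySem.List.pyGetD_zero, List.replicate_succ]
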